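-- pv_equiv track=rewrite | github.com/ilailabs/PYTHON | tutorials/trash/EndSortSoln.py | endsort
-- ===== SOURCE A (Python) =====
-- def endsort(a):
--     sa = sorted(a)
--     n = len(a)
--     k = 0
--     for i in range(n):
--         try:
--             k = a.index(sa[i], k) + 1
--         except ValueError:
--             break
--     else:
--         i +=1
--     return n -i
-- ===== SOURCE B (Python) =====
-- def endsort(a):
--     sa = sorted(a)
--     j = 0
--     for x in a:
--         if j < len(sa) and x == sa[j]:
--             j += 1
--     return len(a) - j
-- ===== Notes on version B (the rewrite author's own statement) =====
-- stated objective: simpler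
-- what changed: A walks sorted(a) and matches each element with list.index(v, k) under try/except and a for-else; B makes one plain left-to-right pass over a with a single pointer into sorted(a), no exceptions or index calls.
import Mathlib
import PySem

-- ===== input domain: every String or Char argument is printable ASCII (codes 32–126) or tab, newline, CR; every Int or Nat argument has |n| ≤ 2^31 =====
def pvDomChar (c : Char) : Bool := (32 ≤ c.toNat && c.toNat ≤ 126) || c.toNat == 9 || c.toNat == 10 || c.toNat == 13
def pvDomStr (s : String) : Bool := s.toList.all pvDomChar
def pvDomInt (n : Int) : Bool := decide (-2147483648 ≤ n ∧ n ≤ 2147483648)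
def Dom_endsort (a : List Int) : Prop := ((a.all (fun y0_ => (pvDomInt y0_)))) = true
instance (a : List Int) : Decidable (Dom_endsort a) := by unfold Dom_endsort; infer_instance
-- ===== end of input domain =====

-- B replaces A's per-element `a.index(v, k)` calls with try/except and for-else by one
-- plain left-to-right pass over `a` with a single pointer into sorted(a); objective: simpler.

-- ===== PORT A =====
-- A's loop `for i in range(n): k = a.index(sa[i], k) + 1` with try/break and for-else;
-- `a.index(v, k)` (first index ≥ k, ValueError if absent) is ported exactly as
-- `(index? (a.drop k) v).map (· + k)`; `none` is the ValueError → break branch.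
def endsortGo (a : List Int) : List Int → Nat → Nat → Int
  | [], i, _ => (a.length : Int) - (i : Int)          -- loop completed: for-else did i += 1 (i = n here)
  | v :: s, i, k =>
    match PySem.List.index? (a.drop k) v with
    | none => (a.length : Int) - (i : Int)            -- ValueError: break, return n - i
    | some d => endsortGo a s (i + 1) (k + d + 1)     -- k = a.index(sa[i], k) + 1

def endsort (a : List Int) : Int := endsortGo a (PySem.List.sorted a (fun x => x)) 0 0

-- ===== PORT B =====
def endsort_alt (a : List Int) : Int :=
  let sa := PySem.List.sorted a (fun x => x)
  let j := a.foldl (fun (j : Nat) x => if h : j < sa.length then (if x = sa[j] then j + 1 else j) else j) 0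
  (a.length : Int) - (j : Int)

-- ===== PRECONDITION & SPEC =====
-- Pre_ excludes only the empty list, on which A raises UnboundLocalError (the loop variable i is never bound).
def Pre_endsort (a : List Int) : Prop := a ≠ []
instance (a : List Int) : Decidable (Pre_endsort a) := by unfold Pre_endsort; infer_instance
def pvWitness_endsort : List Int := [3, 1, 2]

def Spec_endsort (a : List Int) (out : Int) : Prop := out = endsort_alt a
instance (a : List Int) (out : Int) : Decidable (Spec_endsort a out) := by unfold Spec_endsort; infer_instance

-- ===== CLAIM (what is proved, stated in full; the proofs are below) =====
def Claim_equal_endsort : Prop := ∀ (a : List Int), Dom_endsort a → Pre_endsort a → Spec_endsort a (endsort a)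

-- ===== LEMMAS AND PROOFS =====

-- greedy leftmost matching count: how many elements of s (in order) are consumed
-- scanning l left to right
def gCount : List Int → List Int → Nat
  | [], _ => 0
  | _ :: _, [] => 0
  | x :: l, v :: s => if x = v then 1 + gCount l s else gCount l (v :: s)

theorem gCount_nil_right (l : List Int) : gCount l [] = 0 := by
  cases l <;> simp [gCount]

theorem gCount_not_mem (l : List Int) (v : Int) (s : List Int) (h : v ∉ l) :
    gCount l (v :: s) = 0 := by
  induction l with
  | nil => simp [gCount]
  | cons x l ih =>
    simp only [List.mem_cons, not_or] at h
    simp [gCount, Ne.symm h.1, ih h.2]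

theorem gCount_skip (pre l : List Int) (v : Int) (s : List Int) (h : v ∉ pre) :
    gCount (pre ++ l) (v :: s) = gCount l (v :: s) := by
  induction pre with
  | nil => simp
  | cons p pre ih =>
    simp only [List.mem_cons, not_or] at h
    simp [gCount, Ne.symm h.1, ih h.2]

-- A's loop computes n - i - (greedy count on the remaining suffix)
theorem endsortGo_eq (a : List Int) (s : List Int) :
    ∀ (i k : Nat), endsortGo a s i k = (a.length : Int) - (i : Int) - (gCount (a.drop k) s : Int) := by
  induction s with
  | nil => intro i k; simp [endsortGo, gCount_nil_right]
  | cons v s ih =>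
    intro i k
    rw [endsortGo]
    cases hidx : PySem.List.index? (a.drop k) v with
    | none =>
      have hv : v ∉ a.drop k := (PySem.List.index?_eq_none_iff _ _).mp hidx
      simp [gCount_not_mem _ _ _ hv]
    | some d =>
      dsimp only
      obtain ⟨pre, suf, heq, hlen, hnm⟩ := (PySem.List.index?_eq_some_iff _ _ _).mp hidx
      have hdrop : a.drop (k + d + 1) = suf := by
        have h1 : a.drop (k + d + 1) = (a.drop k).drop (d + 1) := by
          rw [List.drop_drop]; ring_nf
        rw [h1, heq]
        have : pre ++ v :: suf = (pre ++ [v]) ++ suf := by simp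
        rw [this]
        have hl : (pre ++ [v]).length = d + 1 := by simp [hlen]
        rw [← hl, List.drop_left]
      rw [ih, hdrop, heq, gCount_skip pre (v :: suf) v s hnm]
      simp [gCount]
      ring

-- B's fold computes j + (greedy count of the suffix of sa from j)
theorem foldl_eq (sa : List Int) (l : List Int) :
    ∀ (j : Nat), j ≤ sa.length →
      l.foldl (fun (j : Nat) x => if h : j < sa.length then (if x = sa[j] then j + 1 else j) else j) j
        = j + gCount l (sa.drop j) := by
  induction l with
  | nil => intro j _; simp [gCount]
  | cons x l ih =>
    intro j hj
    rw [List.foldl_cons]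
    by_cases h : j < sa.length
    · rw [dif_pos h]
      by_cases hx : x = sa[j]
      · rw [if_pos hx, ih (j + 1) (by omega), List.drop_eq_getElem_cons h]
        simp [gCount, hx]
        omega
      · rw [if_neg hx, ih j hj, List.drop_eq_getElem_cons h]
        simp [gCount, hx]
    · rw [dif_neg h]
      have hje : sa.drop j = [] := by simp [show j = sa.length by omega]
      rw [ih j hj, hje]
      simp [gCount_nil_right]

-- ===== VERDICT (by name: the statement is the Claim_ definition above) =====
theorem endsort_spec : Claim_equal_endsort := by
  intro a _ _
  unfold Spec_endsort endsort endsort_alt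
  rw [endsortGo_eq]
  dsimp only
  rw [foldl_eq (PySem.List.sorted a (fun x => x)) a 0 (by omega)]
  simp
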